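-- pv_equiv track=rewrite | github.com/vincentbillaut/AoC2022 | day22.py | basic_move_proposal
-- ===== SOURCE A (Python) =====
-- DIRECTIONS = [(1, 0), (0, 1), (-1, 0), (0, -1)]
--
-- def basic_move_proposal(current, facing, spaces, walls):
--     direction = DIRECTIONS[facing]
--     min_y_of_col, max_y_of_col = min(y for x, y in spaces | walls if x == current[0]), max(
--         y for x, y in spaces | walls if x == current[0]
--     )
--     min_x_of_row, max_x_of_row = min(x for x, y in spaces | walls if y == current[1]), max(
--         x for x, y in spaces | walls if y == current[1]
--     )
--     new_pos_y = current[1] if direction[1] == 0 else (min_y_of_col if current[1] == max_y_of_col else max_y_of_col)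
--     new_pos_x = current[0] if direction[0] == 0 else (min_x_of_row if current[0] == max_x_of_row else max_x_of_row)
--     return (new_pos_x, new_pos_y), facing
-- ===== SOURCE B (Python) =====
-- DIRECTIONS = [(1, 0), (0, 1), (-1, 0), (0, -1)]
--
-- def basic_move_proposal(current, facing, spaces, walls):
--     dx, dy = DIRECTIONS[facing]
--     cols = {}
--     rows = {}
--     for x, y in spaces | walls:
--         lo, hi = cols.get(x, (y, y))
--         cols[x] = (min(lo, y), max(hi, y))
--         lo, hi = rows.get(y, (x, x))
--         rows[y] = (min(lo, x), max(hi, x))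
--     cx, cy = current
--     min_y_of_col, max_y_of_col = cols[cx]
--     min_x_of_row, max_x_of_row = rows[cy]
--     new_y = cy if dy == 0 else (min_y_of_col if cy == max_y_of_col else max_y_of_col)
--     new_x = cx if dx == 0 else (min_x_of_row if cx == max_x_of_row else max_x_of_row)
--     return (new_x, new_y), facing
-- ===== Notes on version B (the rewrite author's own statement) =====
-- stated objective: alternative
-- what changed: Builds per-column and per-row (min,max) index dictionaries in one pass over the union, then answers by two O(1) dict lookups, instead of A's four filtered min/max generator scans over a four-times-rebuilt set union; Pre_ excludes inputs where A raises (facing out of range, or no point sharing current's column or row, where B's dict lookup raises KeyError).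
import Mathlib
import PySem

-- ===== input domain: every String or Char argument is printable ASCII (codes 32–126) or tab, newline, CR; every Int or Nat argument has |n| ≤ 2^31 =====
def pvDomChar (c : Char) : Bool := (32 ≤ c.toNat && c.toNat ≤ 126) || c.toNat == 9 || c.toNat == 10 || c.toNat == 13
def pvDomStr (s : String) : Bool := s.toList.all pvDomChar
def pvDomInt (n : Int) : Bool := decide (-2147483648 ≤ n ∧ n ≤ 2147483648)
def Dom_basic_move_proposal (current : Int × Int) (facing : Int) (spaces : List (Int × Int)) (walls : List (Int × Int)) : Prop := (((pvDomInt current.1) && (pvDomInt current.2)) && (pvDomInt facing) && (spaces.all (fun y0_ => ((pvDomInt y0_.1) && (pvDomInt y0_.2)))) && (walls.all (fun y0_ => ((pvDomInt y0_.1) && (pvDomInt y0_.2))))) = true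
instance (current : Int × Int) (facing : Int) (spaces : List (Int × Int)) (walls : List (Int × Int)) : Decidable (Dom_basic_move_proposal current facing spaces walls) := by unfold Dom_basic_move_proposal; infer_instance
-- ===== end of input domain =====

-- B builds per-column and per-row (min,max) index dictionaries in one pass over the union
-- and answers by two dict lookups, instead of A's four filtered min/max scans (alternative).

-- ===== PORT A =====
def DIRECTIONS : List (Int × Int) := [(1, 0), (0, 1), (-1, 0), (0, -1)]

def basic_move_proposal (current : Int × Int) (facing : Int) (spaces : List (Int × Int)) (walls : List (Int × Int)) : (Int × Int) × Int :=
  match PySem.List.pyGet? DIRECTIONS facing with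
  | none => ((0, 0), facing)  -- IndexError in Python; excluded by Pre_
  | some direction =>
    let pts := PySem.Set.union spaces walls
    let colYs := (pts.filter (fun p => p.1 == current.1)).map (fun p => p.2)
    let rowXs := (pts.filter (fun p => p.2 == current.2)).map (fun p => p.1)
    match PySem.List.min? colYs (fun y => y), PySem.List.max? colYs (fun y => y),
          PySem.List.min? rowXs (fun y => y), PySem.List.max? rowXs (fun y => y) with
    | some min_y_of_col, some max_y_of_col, some min_x_of_row, some max_x_of_row =>
      let new_pos_y := if direction.2 == 0 then current.2
                       else (if current.2 == max_y_of_col then min_y_of_col else max_y_of_col)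
      let new_pos_x := if direction.1 == 0 then current.1
                       else (if current.1 == max_x_of_row then min_x_of_row else max_x_of_row)
      ((new_pos_x, new_pos_y), facing)
    | _, _, _, _ => ((0, 0), facing)  -- ValueError (min of empty generator); excluded by Pre_

-- ===== PORT B =====
def bmpDIRECTIONS : List (Int × Int) := [(1, 0), (0, 1), (-1, 0), (0, -1)]

-- cols.get(x, (y, y)); cols[x] = (min(lo, y), max(hi, y))
def bmpUpd (d : PySem.Dict Int (Int × Int)) (k : Int) (v : Int) : PySem.Dict Int (Int × Int) :=
  let lohi := d.getD k (v, v)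
  d.insert k (min lohi.1 v, max lohi.2 v)

def bmpStep (st : PySem.Dict Int (Int × Int) × PySem.Dict Int (Int × Int)) (p : Int × Int) :
    PySem.Dict Int (Int × Int) × PySem.Dict Int (Int × Int) :=
  (bmpUpd st.1 p.1 p.2, bmpUpd st.2 p.2 p.1)

def basic_move_proposal_alt (current : Int × Int) (facing : Int) (spaces : List (Int × Int)) (walls : List (Int × Int)) : (Int × Int) × Int :=
  -- DIRECTIONS[facing] raises IndexError, a missing dict key raises KeyError:
  -- both excluded by Pre_; Option.elim returns ((0,0), facing) there.
  (PySem.List.pyGet? bmpDIRECTIONS facing).elim ((0, 0), facing) (fun d =>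
    let st := (PySem.Set.union spaces walls).foldl bmpStep (PySem.Dict.empty, PySem.Dict.empty)
    (st.1.get? current.1).elim ((0, 0), facing) (fun colMM =>
    (st.2.get? current.2).elim ((0, 0), facing) (fun rowMM =>
      let new_y := if d.2 == 0 then current.2 else (if current.2 == colMM.2 then colMM.1 else colMM.2)
      let new_x := if d.1 == 0 then current.1 else (if current.1 == rowMM.2 then rowMM.1 else rowMM.2)
      ((new_x, new_y), facing))))

-- ===== PRECONDITION & SPEC =====
-- Pre_ excludes exactly the inputs where Python A raises: facing outside the list index range
-- (IndexError), or no point sharing current's column or row (ValueError from min of an empty generator).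
def Pre_basic_move_proposal (current : Int × Int) (facing : Int) (spaces : List (Int × Int)) (walls : List (Int × Int)) : Prop :=
  (-4 ≤ facing ∧ facing < 4) ∧
  (∃ p ∈ spaces ++ walls, p.1 = current.1) ∧
  (∃ p ∈ spaces ++ walls, p.2 = current.2)
instance (current : Int × Int) (facing : Int) (spaces : List (Int × Int)) (walls : List (Int × Int)) : Decidable (Pre_basic_move_proposal current facing spaces walls) := by unfold Pre_basic_move_proposal; infer_instance

def pvWitness_basic_move_proposal : (Int × Int) × Int × (List (Int × Int)) × (List (Int × Int)) := ((0, 0), 0, [(0, 0), (1, 0)], [(0, 1)])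

def Spec_basic_move_proposal (current : Int × Int) (facing : Int) (spaces : List (Int × Int)) (walls : List (Int × Int)) (out : (Int × Int) × Int) : Prop := out = basic_move_proposal_alt current facing spaces walls
instance (current : Int × Int) (facing : Int) (spaces : List (Int × Int)) (walls : List (Int × Int)) (out : (Int × Int) × Int) : Decidable (Spec_basic_move_proposal current facing spaces walls out) := by unfold Spec_basic_move_proposal; infer_instance

-- ===== CLAIM (what is proved, stated in full; the proofs are below) =====
def Claim_equal_basic_move_proposal : Prop := ∀ (current : Int × Int) (facing : Int) (spaces : List (Int × Int)) (walls : List (Int × Int)), Dom_basic_move_proposal current facing spaces walls → Pre_basic_move_proposal current facing spaces walls → Spec_basic_move_proposal current facing spaces walls (basic_move_proposal current facing spaces walls)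

-- ===== LEMMAS AND PROOFS =====

-- one bmpUpd step, seen through get? at a fixed key
def bmpAcc (o : Option (Int × Int)) (v : Int) : Option (Int × Int) :=
  match o with
  | none => some (v, v)
  | some lohi => some (min lohi.1 v, max lohi.2 v)

theorem get?_bmpUpd (d : PySem.Dict Int (Int × Int)) (x y k : Int) :
    (bmpUpd d x y).get? k = if k = x then bmpAcc (d.get? k) y else d.get? k := by
  unfold bmpUpd
  rw [PySem.Dict.get?_insert]
  by_cases h : k = x
  · subst h
    cases hg : d.get? k with
    | none => simp [PySem.Dict.getD_eq_get?_getD, hg, bmpAcc]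
    | some lohi => simp [PySem.Dict.getD_eq_get?_getD, hg, bmpAcc]
  · simp [h]

-- the fold, seen through get? at a fixed key: it accumulates bmpAcc over the filtered projections
theorem get?_foldl_bmpStep (l : List (Int × Int)) (st : PySem.Dict Int (Int × Int) × PySem.Dict Int (Int × Int)) (k : Int) :
    ((l.foldl bmpStep st).1.get? k = ((l.filter (fun p => p.1 == k)).map (fun p => p.2)).foldl bmpAcc (st.1.get? k)) ∧
    ((l.foldl bmpStep st).2.get? k = ((l.filter (fun p => p.2 == k)).map (fun p => p.1)).foldl bmpAcc (st.2.get? k)) := by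
  induction l generalizing st with
  | nil => exact ⟨rfl, rfl⟩
  | cons p l ih =>
    simp only [List.foldl_cons, List.filter_cons]
    refine ⟨?_, ?_⟩
    · rw [(ih (bmpStep st p)).1]
      by_cases h1 : p.1 = k
      · simp [h1, bmpStep, get?_bmpUpd]
      · simp [bmpStep, get?_bmpUpd, h1, Ne.symm h1]
    · rw [(ih (bmpStep st p)).2]
      by_cases h2 : p.2 = k
      · simp [h2, bmpStep, get?_bmpUpd]
      · simp [bmpStep, get?_bmpUpd, h2, Ne.symm h2]

theorem foldl_bmpAcc_some (t : List Int) (a b : Int) :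
    t.foldl bmpAcc (some (a, b)) = some (t.foldl min a, t.foldl max b) := by
  induction t generalizing a b with
  | nil => rfl
  | cons x t ih => simp only [List.foldl_cons, bmpAcc, ih]

theorem foldl_bmpAcc_none (ys : List Int) :
    ys.foldl bmpAcc none =
      match PySem.List.min? ys (fun y => y), PySem.List.max? ys (fun y => y) with
      | some m, some M => some (m, M)
      | _, _ => none := by
  cases ys with
  | nil => rfl
  | cons x t =>
    simp [bmpAcc, foldl_bmpAcc_some, PySem.List.min?_id_cons, PySem.List.max?_id_cons]

-- ===== VERDICT (by name: the statement is the Claim_ definition above) =====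
theorem basic_move_proposal_spec : Claim_equal_basic_move_proposal := by
  intro current facing spaces walls _hdom _hpre
  unfold Spec_basic_move_proposal basic_move_proposal basic_move_proposal_alt
  rw [show bmpDIRECTIONS = DIRECTIONS from rfl]
  cases hg : PySem.List.pyGet? DIRECTIONS facing with
  | none => rfl
  | some d =>
    have h1 := (get?_foldl_bmpStep (PySem.Set.union spaces walls)
        (PySem.Dict.empty, PySem.Dict.empty) current.1).1
    have h2 := (get?_foldl_bmpStep (PySem.Set.union spaces walls)
        (PySem.Dict.empty, PySem.Dict.empty) current.2).2
    simp only [PySem.Dict.get?_empty] at h1 h2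
    rw [foldl_bmpAcc_none] at h1 h2
    simp only [h1, h2]
    cases PySem.List.min? (((PySem.Set.union spaces walls).filter (fun p => p.1 == current.1)).map (fun p => p.2)) (fun y => y) <;>
    cases PySem.List.max? (((PySem.Set.union spaces walls).filter (fun p => p.1 == current.1)).map (fun p => p.2)) (fun y => y) <;>
    cases PySem.List.min? (((PySem.Set.union spaces walls).filter (fun p => p.2 == current.2)).map (fun p => p.1)) (fun y => y) <;>
    cases PySem.List.max? (((PySem.Set.union spaces walls).filter (fun p => p.2 == current.2)).map (fun p => p.1)) (fun y => y) <;>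
    rfl
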